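-- pv_equiv track=rewrite | github.com/rOyalFruit/Algorithm | 프로그래머스/3/12987. 숫자 게임/숫자 게임.py | solution
-- ===== SOURCE A (Python) =====
-- def solution(A, B):
--     answer = 0
--     A.sort()
--     B.sort()
--
--     a_idx = 0
--     for i in range(len(B)):
--         if B[i] <= A[a_idx]:
--             continue
--         answer += 1
--         a_idx += 1
--
--     return answer
-- ===== SOURCE B (Python) =====
-- def solution(A, B):
--     A.sort()
--     B.sort()
--     events = sorted([2 * b for b in B] + [2 * a + 1 for a in A])
--     avail = 0
--     count = 0
--     for e in events:
--         if e % 2 == 1: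
--             avail += 1
--         elif avail > 0:
--             count += 1
--             avail -= 1
--     return count
-- ===== Notes on version B (the rewrite author's own statement) =====
-- stated objective: alternative
-- what changed: Replaced the two-array pointer greedy with a sweep over one merged event stream: B values become events 2*b and A values events 2*a+1, all sorted together; a single scan keeps an availability counter (odd event releases an A, even event scores a win iff a strictly smaller A is available), so no index ever crosses between the two arrays.
-- outside the precondition, e.g. on solution([5], [1, 2]): A returns 0, B returns 0
import Mathlib
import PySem

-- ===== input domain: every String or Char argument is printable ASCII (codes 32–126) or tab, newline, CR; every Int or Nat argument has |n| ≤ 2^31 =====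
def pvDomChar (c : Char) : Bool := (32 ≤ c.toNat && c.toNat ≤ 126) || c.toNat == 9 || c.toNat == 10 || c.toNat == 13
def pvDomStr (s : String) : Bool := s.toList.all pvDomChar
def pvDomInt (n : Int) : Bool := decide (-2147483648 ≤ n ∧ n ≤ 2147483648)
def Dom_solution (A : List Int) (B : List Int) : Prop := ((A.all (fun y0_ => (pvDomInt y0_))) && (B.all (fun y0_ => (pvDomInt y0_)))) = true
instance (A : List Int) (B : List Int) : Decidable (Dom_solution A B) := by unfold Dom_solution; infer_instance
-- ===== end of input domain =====

-- B replaces the two-array pointer greedy by a sweep over one merged sorted event stream (same return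
-- value; both Pythons sort their list arguments in place — B performs the same in-place sorts, and the
-- equivalence proved here is about the return value).

-- ===== PORT A =====
def solution (A : List Int) (B : List Int) : Int :=
  let As := PySem.List.sorted A (fun x => x) false
  let Bs := PySem.List.sorted B (fun x => x) false
  let st := (PySem.List.pyRange 0 (Bs.length : Int) 1).foldl
    (fun (st : Int × Int) i =>
      if PySem.List.pyGetD Bs i 0 ≤ PySem.List.pyGetD As st.2 0 then st
      else (st.1 + 1, st.2 + 1)) (0, 0)
  st.1

-- ===== PORT B =====
def solution_alt (A : List Int) (B : List Int) : Int :=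
  let As := PySem.List.sorted A (fun x => x) false
  let Bs := PySem.List.sorted B (fun x => x) false
  let events := PySem.List.sorted (Bs.map (fun b => 2 * b) ++ As.map (fun a => 2 * a + 1))
    (fun x => x) false
  let st := events.foldl
    (fun (st : Int × Int) e =>
      if PySem.Int.mod e 2 == 1 then (st.1, st.2 + 1)
      else if 0 < st.2 then (st.1 + 1, st.2 - 1) else st) (0, 0)
  st.1

-- ===== PRECONDITION & SPEC =====
-- Pre_ excludes inputs with len(B) > len(A): there A can raise IndexError once the wins exhaust A
-- (the task guarantees equal lengths); where A does still return, B happens to agree, but the crash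
-- cannot be separated in closed form.
def Pre_solution (A : List Int) (B : List Int) : Prop := B.length ≤ A.length
instance (A : List Int) (B : List Int) : Decidable (Pre_solution A B) := by unfold Pre_solution; infer_instance
def pvWitness_solution : List Int × List Int := ([1, 2, 3], [2, 1, 3])
def Spec_solution (A : List Int) (B : List Int) (out : Int) : Prop := out = solution_alt A B
instance (A : List Int) (B : List Int) (out : Int) : Decidable (Spec_solution A B out) := by unfold Spec_solution; infer_instance

-- ===== CLAIM (what is proved, stated in full; the proofs are below) =====
def Claim_equal_solution : Prop := ∀ (A : List Int) (B : List Int), Dom_solution A B → Pre_solution A B → Spec_solution A B (solution A B)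

-- ===== LEMMAS AND PROOFS =====

-- A's greedy on sorted ascending lists: consume B from the front, consume A's front on a win.
def gcount : List Int → List Int → Int
  | _, [] => 0
  | [], _ :: _ => 0
  | a :: as, b :: bs => if b ≤ a then gcount (a :: as) bs else 1 + gcount as bs
termination_by _ bs => bs.length

-- Port A's loop computes gcount (with the pointer invariant a_idx = answer = k).
theorem portA_loop (As : List Int) (bs : List Int) (k : Nat)
    (hlen : k + bs.length ≤ As.length) :
    (bs.foldl (fun (st : Int × Int) b =>
        if b ≤ PySem.List.pyGetD As st.2 0 then st
        else (st.1 + 1, st.2 + 1)) ((k : Int), (k : Int))).1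
      = (k : Int) + gcount (As.drop k) bs := by
  induction bs generalizing k with
  | nil => simp [gcount]
  | cons b bs' ih =>
    have hk : k < As.length := by simp at hlen; omega
    have hget : PySem.List.pyGetD As ((k : Nat) : Int) 0 = As[k] := by
      rw [PySem.List.pyGetD_natCast]; exact List.getD_eq_getElem As 0 hk
    have hdrop : As.drop k = As[k] :: As.drop (k + 1) := List.drop_eq_getElem_cons hk
    simp only [List.foldl_cons, hget, hdrop, gcount]
    by_cases h : b ≤ As[k]
    · rw [if_pos h, if_pos h, ih k (by simp at hlen ⊢; omega), hdrop]
    · rw [if_neg h, if_neg h]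
      have : ((k : Int) + 1, (k : Int) + 1) = (((k + 1 : Nat) : Int), ((k + 1 : Nat) : Int)) := by
        push_cast; ring_nf
      rw [this, ih (k + 1) (by simp at hlen ⊢; omega)]
      push_cast; ring

-- B-side: the merge of the two encoded sorted streams (proof device naming the sorted event list).
def mergeK : List Int → List Int → List Int
  | [], as => as.map (fun a => 2 * a + 1)
  | b :: bs, [] => (b :: bs).map (fun b => 2 * b)
  | b :: bs, a :: as =>
      if b ≤ a then 2 * b :: mergeK bs (a :: as) else (2 * a + 1) :: mergeK (b :: bs) as
termination_by bs as => bs.length + as.length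

theorem mergeK_nil_right (bs : List Int) : mergeK bs [] = bs.map (fun b => 2 * b) := by
  cases bs <;> simp [mergeK]

theorem mergeK_perm (bs as : List Int) :
    (mergeK bs as).Perm (bs.map (fun b => 2 * b) ++ as.map (fun a => 2 * a + 1)) := by
  fun_induction mergeK bs as with
  | case1 as => simp
  | case2 b bs => simp
  | case3 b bs a as h ih => simp only [List.map_cons, List.cons_append]; exact ih.cons _
  | case4 b bs a as h ih =>
    simp only [List.map_cons]
    exact (ih.cons _).trans (List.perm_middle.symm)

theorem mergeK_pairwise (bs as : List Int) :
    bs.Pairwise (· ≤ ·) → as.Pairwise (· ≤ ·) → (mergeK bs as).Pairwise (· ≤ ·) := by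
  fun_induction mergeK bs as with
  | case1 as =>
    intro _ ha
    exact ha.map _ (fun x y hxy => by omega)
  | case2 b bs =>
    intro hb _
    exact hb.map _ (fun x y hxy => by omega)
  | case3 b bs a as h ih =>
    intro hb ha
    rw [List.pairwise_cons]
    refine ⟨fun y hy => ?_, ih hb.tail ha⟩
    have := (mergeK_perm bs (a :: as)).mem_iff.mp hy
    simp only [List.mem_append, List.mem_map] at this
    rcases this with ⟨b', hb', rfl⟩ | ⟨a', ha', rfl⟩
    · have := List.rel_of_pairwise_cons hb hb'; omega
    · rcases List.mem_cons.mp ha' with rfl | ha'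
      · omega
      · have := List.rel_of_pairwise_cons ha ha'; omega
  | case4 b bs a as h ih =>
    intro hb ha
    rw [List.pairwise_cons]
    refine ⟨fun y hy => ?_, ih hb ha.tail⟩
    have := (mergeK_perm (b :: bs) as).mem_iff.mp hy
    simp only [List.mem_append, List.mem_map] at this
    rcases this with ⟨b', hb', rfl⟩ | ⟨a', ha', rfl⟩
    · rcases List.mem_cons.mp hb' with rfl | hb'
      · omega
      · have := List.rel_of_pairwise_cons hb hb'; omega
    · have := List.rel_of_pairwise_cons ha ha'; omega

-- The sweep count over an event list (odd event = an A becomes available, even event = a B wins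
-- iff an A is available).
def scount : List Int → Int → Int
  | [], _ => 0
  | e :: es, v =>
      if PySem.Int.mod e 2 == 1 then scount es (v + 1)
      else if 0 < v then 1 + scount es (v - 1) else scount es v

theorem emod_even (b : Int) : (PySem.Int.mod (2 * b) 2 == 1) = false := by
  simp [PySem.Int.mod]
theorem emod_odd (a : Int) : (PySem.Int.mod (2 * a + 1) 2 == 1) = true := by
  simp [PySem.Int.mod]

-- Port B's loop computes scount.
theorem portB_loop (es : List Int) (c v : Int) :
    (es.foldl (fun (st : Int × Int) e =>
        if PySem.Int.mod e 2 == 1 then (st.1, st.2 + 1)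
        else if 0 < st.2 then (st.1 + 1, st.2 - 1) else st) (c, v)).1
      = c + scount es v := by
  induction es generalizing c v with
  | nil => simp [scount]
  | cons e es' ih =>
    simp only [List.foldl_cons, scount]
    by_cases h : (PySem.Int.mod e 2 == 1) = true
    · rw [if_pos h, if_pos h, ih]
    · rw [if_neg h, if_neg h]
      by_cases h2 : 0 < v
      · rw [if_pos h2, if_pos h2, ih]; ring
      · rw [if_neg h2, if_neg h2, ih]

-- The sweep with an abstract availability counter, as a greedy on the two lists.
def gca : Int → List Int → List Int → Int
  | _, _, [] => 0
  | v, as, b :: bs =>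
      if 0 < v then 1 + gca (v - 1) as bs
      else match as with
        | [] => gca v [] bs
        | a :: as' => if b ≤ a then gca v (a :: as') bs else 1 + gca v as' bs
termination_by _ _ bs => bs.length

-- Converting the smallest A (smaller than every remaining B) into an anonymous available slot is neutral.
theorem gca_cons_nil (v b : Int) (bs : List Int) :
    gca v [] (b :: bs) = if 0 < v then 1 + gca (v - 1) [] bs else gca v [] bs := by
  simp [gca]

theorem gca_cons_cons (v a b : Int) (as bs : List Int) :
    gca v (a :: as) (b :: bs) = if 0 < v then 1 + gca (v - 1) (a :: as) bs
      else if b ≤ a then gca v (a :: as) bs else 1 + gca v as bs := by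
  simp [gca]

theorem gca_dummy (bs : List Int) : ∀ (as : List Int) (v a : Int), 0 ≤ v →
    (∀ b' ∈ bs, a < b') → gca (v + 1) as bs = gca v (a :: as) bs := by
  induction bs with
  | nil => intro as v a _ _; simp [gca]
  | cons b bs' ih =>
    intro as v a hv hab
    have hab' : ∀ b' ∈ bs', a < b' := fun b' h => hab b' (List.mem_cons_of_mem _ h)
    have hb : a < b := hab b List.mem_cons_self
    cases as with
    | nil =>
      rw [gca_cons_nil, gca_cons_cons, if_pos (by omega : (0:Int) < v + 1)]
      by_cases h : 0 < v
      · rw [if_pos h]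
        have := ih [] (v - 1) a (by omega) hab'
        rw [show v - 1 + 1 = v by ring] at this
        rw [show v + 1 - 1 = v by ring, this]
      · rw [if_neg h, if_neg (by omega : ¬ b ≤ a)]
        rw [show v + 1 - 1 = v by ring]
    | cons a' as'' =>
      rw [gca_cons_cons (v + 1), gca_cons_cons v, if_pos (by omega : (0:Int) < v + 1)]
      by_cases h : 0 < v
      · rw [if_pos h]
        have := ih (a' :: as'') (v - 1) a (by omega) hab'
        rw [show v - 1 + 1 = v by ring] at this
        rw [show v + 1 - 1 = v by ring, this]
      · rw [if_neg h, if_neg (by omega : ¬ b ≤ a)]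
        rw [show v + 1 - 1 = v by ring]

theorem gcount_nil (bs : List Int) : gcount [] bs = 0 := by cases bs <;> simp [gcount]

theorem gca_zero (bs : List Int) : ∀ as, gca 0 as bs = gcount as bs := by
  induction bs with
  | nil => intro as; cases as <;> simp [gca, gcount]
  | cons b bs' ih =>
    intro as
    cases as with
    | nil =>
      rw [gca_cons_nil, if_neg (by omega : ¬ (0:Int) < 0), ih, gcount_nil, gcount_nil]
    | cons a as' =>
      rw [gca_cons_cons, if_neg (by omega : ¬ (0:Int) < 0)]
      simp only [gcount]
      by_cases h : b ≤ a
      · rw [if_pos h, if_pos h, ih]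
      · rw [if_neg h, if_neg h, ih]

theorem scount_odds (as : List Int) (v : Int) :
    scount (as.map (fun a => 2 * a + 1)) v = 0 := by
  induction as generalizing v with
  | nil => simp [scount]
  | cons a as' ih => simp only [List.map_cons, scount, emod_odd, if_pos]; exact ih (v + 1)

theorem scount_mergeK_inner (b : Int) (bs' : List Int)
    (ihb : ∀ (as : List Int) (v : Int), 0 ≤ v → as.Pairwise (· ≤ ·) →
      scount (mergeK bs' as) v = gca v as bs')
    (hb : (b :: bs').Pairwise (· ≤ ·)) :
    ∀ (as : List Int) (v : Int), 0 ≤ v → as.Pairwise (· ≤ ·) →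
      scount (mergeK (b :: bs') as) v = gca v as (b :: bs') := by
  intro as
  induction as with
  | nil =>
    intro v hv _
    rw [mergeK_nil_right, List.map_cons]
    simp only [scount, emod_even, Bool.false_eq_true, if_false, gca_cons_nil]
    rw [← mergeK_nil_right]
    by_cases h : 0 < v
    · rw [if_pos h, if_pos h, ihb [] (v - 1) (by omega) (by simp)]
    · rw [if_neg h, if_neg h, ihb [] v hv (by simp)]
  | cons a as' iha =>
    intro v hv ha
    simp only [mergeK]
    by_cases h : b ≤ a
    · rw [if_pos h]
      simp only [scount, emod_even, Bool.false_eq_true, if_false, gca_cons_cons]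
      by_cases h2 : 0 < v
      · rw [if_pos h2, if_pos h2, ihb (a :: as') (v - 1) (by omega) ha]
      · rw [if_neg h2, if_neg h2, if_pos h, ihb (a :: as') v hv ha]
    · rw [if_neg h]
      simp only [scount, emod_odd, if_pos]
      rw [iha (v + 1) (by omega) ha.tail]
      rw [gca_dummy (b :: bs') as' v a hv (by
        intro b' hb'
        rcases List.mem_cons.mp hb' with rfl | hb''
        · omega
        · have := List.rel_of_pairwise_cons hb hb''; omega)]

theorem scount_mergeK (bs : List Int) : ∀ (as : List Int) (v : Int), 0 ≤ v →
    bs.Pairwise (· ≤ ·) → as.Pairwise (· ≤ ·) →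
    scount (mergeK bs as) v = gca v as bs := by
  induction bs with
  | nil =>
    intro as v _ _ _
    rw [show mergeK [] as = as.map (fun a => 2 * a + 1) by cases as <;> simp [mergeK]]
    rw [scount_odds]
    simp [gca]
  | cons b bs' ihb =>
    intro as v hv hb ha
    exact scount_mergeK_inner b bs' (fun as v hv ha => ihb as v hv hb.tail ha) hb as v hv ha

-- ===== VERDICT (by name: the statement is the Claim_ definition above) =====
theorem solution_spec : Claim_equal_solution := by
  intro A B _hdom hpre
  unfold Spec_solution solution solution_alt
  dsimp only []
  set As := PySem.List.sorted A (fun x => x) false with hAs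
  set Bs := PySem.List.sorted B (fun x => x) false with hBs
  have hle : Bs.length ≤ As.length := by
    rw [PySem.List.length_sorted, PySem.List.length_sorted]; exact hpre
  have hpa : As.Pairwise (· ≤ ·) := PySem.List.sorted_pairwise A (fun x => x)
  have hpb : Bs.Pairwise (· ≤ ·) := PySem.List.sorted_pairwise B (fun x => x)
  rw [PySem.List.foldl_pyRange_zero_pyGetD' Bs 0
        (fun (st : Int × Int) b =>
          if b ≤ PySem.List.pyGetD As st.2 0 then st else (st.1 + 1, st.2 + 1)) (0, 0)]
  have hev : PySem.List.sorted (Bs.map (fun b => 2 * b) ++ As.map (fun a => 2 * a + 1))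
      (fun x => x) false = mergeK Bs As :=
    PySem.List.sorted_id_eq_of_perm_of_pairwise _ _ (mergeK_perm Bs As) (mergeK_pairwise Bs As hpb hpa)
  rw [hev, portB_loop]
  have ha := portA_loop As Bs 0 (by omega)
  simp only [Nat.cast_zero, List.drop_zero, zero_add] at ha
  rw [ha, scount_mergeK Bs As 0 le_rfl hpb hpa, gca_zero]
  ring
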